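-- pv_equiv track=rewrite | github.com/FredericoBender/Memory-Allocator | funcoes.py | dicionarioDeEntrada
-- ===== SOURCE A (Python) =====
-- def dicionarioDeEntrada(processos):
--     temposEntrada ={}
--     processoAtual=0
--     for i in processos:
--         if (i[2] in temposEntrada):#processos[2] é tempo de chegada
--             temposEntrada[i[2]].append(processoAtual)
--         else:
--             temposEntrada[i[2]]= [processoAtual]
--         processoAtual+=1
--     #dicionário com os tempos de entrada dos processos = {ciclo de entrada:nº do processo,...}
--     return temposEntrada
-- ===== SOURCE B (Python) =====
-- def dicionarioDeEntrada(processos):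
--     tempos = [p[2] for p in processos]
--     return {t: [i for i, x in enumerate(tempos) if x == t]
--             for t in dict.fromkeys(tempos)}
-- ===== Notes on version B (the rewrite author's own statement) =====
-- stated objective: alternative
-- what changed: Replaces the single-pass dict-accumulation with counter by a two-phase comprehension: extract arrival times, deduplicate them in first-occurrence order with dict.fromkeys, and build each group's index list by filtering enumerate(tempos).
import Mathlib
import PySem

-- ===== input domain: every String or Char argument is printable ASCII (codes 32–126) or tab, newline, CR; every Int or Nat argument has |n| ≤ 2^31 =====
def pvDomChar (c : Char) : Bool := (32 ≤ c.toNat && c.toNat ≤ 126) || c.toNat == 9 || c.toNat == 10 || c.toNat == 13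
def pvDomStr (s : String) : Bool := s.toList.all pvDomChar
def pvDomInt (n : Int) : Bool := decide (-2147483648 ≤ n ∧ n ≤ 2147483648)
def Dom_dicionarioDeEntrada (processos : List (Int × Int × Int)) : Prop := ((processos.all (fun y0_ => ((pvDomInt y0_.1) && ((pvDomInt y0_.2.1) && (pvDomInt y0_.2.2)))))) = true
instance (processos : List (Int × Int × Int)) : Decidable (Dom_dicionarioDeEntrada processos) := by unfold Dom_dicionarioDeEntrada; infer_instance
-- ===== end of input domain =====

-- B groups indices by arrival time via dedup-of-keys + per-key filter of enumerate instead of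
-- A's one-pass dict accumulation with a running counter; objective: alternative decomposition.

-- ===== PORT A =====
-- loop state: (temposEntrada, processoAtual)
def dicionarioDeEntrada (processos : List (Int × Int × Int)) : List (Int × List Int) :=
  (processos.foldl
    (fun (st : PySem.Dict Int (List Int) × Int) i =>
      if st.1.contains i.2.2 then
        (st.1.modify i.2.2 [] (fun l => l ++ [st.2]), st.2 + 1)
      else
        (st.1.insert i.2.2 [st.2], st.2 + 1))
    (PySem.Dict.empty, 0)).1.items

-- ===== PORT B =====
def dicionarioDeEntrada_alt (processos : List (Int × Int × Int)) : List (Int × List Int) :=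
  let tempos := processos.map (fun p => p.2.2)
  (PySem.List.dedup tempos).map (fun t =>
    (t, ((PySem.List.enumerate tempos).filter (fun p => p.2 == t)).map (fun p => p.1)))

-- ===== PRECONDITION & SPEC =====
def Spec_dicionarioDeEntrada (processos : List (Int × Int × Int)) (out : List (Int × List Int)) : Prop := out = dicionarioDeEntrada_alt processos
instance (processos : List (Int × Int × Int)) (out : List (Int × List Int)) : Decidable (Spec_dicionarioDeEntrada processos out) := by unfold Spec_dicionarioDeEntrada; infer_instance

-- ===== CLAIM (what is proved, stated in full; the proofs are below) =====
def Claim_equal_dicionarioDeEntrada : Prop := ∀ (processos : List (Int × Int × Int)), Dom_dicionarioDeEntrada processos → Spec_dicionarioDeEntrada processos (dicionarioDeEntrada processos)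

-- ===== LEMMAS AND PROOFS =====

-- A's branch (append when present, fresh singleton otherwise) is exactly Dict.modify with default [].
theorem pv_step_eq (d : PySem.Dict Int (List Int)) (k c : Int) :
    (if d.contains k then d.modify k [] (fun l => l ++ [c]) else d.insert k [c])
      = d.modify k [] (fun l => l ++ [c]) := by
  by_cases h : d.contains k
  · simp [h]
  · simp only [Bool.not_eq_true] at h
    have hg : d.getD k [] = [] := by
      rw [PySem.Dict.getD_of_not_contains]; simp [h]
    simp [h, PySem.Dict.modify, hg]

-- A's counted fold over processos is a modify-fold over the (index, time)-pairs.
theorem pv_fold_bridge (ps : List (Int × Int × Int)) (d : PySem.Dict Int (List Int)) (c : Int) :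
    (ps.foldl
      (fun (st : PySem.Dict Int (List Int) × Int) i =>
        if st.1.contains i.2.2 then
          (st.1.modify i.2.2 [] (fun l => l ++ [st.2]), st.2 + 1)
        else
          (st.1.insert i.2.2 [st.2], st.2 + 1))
      (d, c)).1
    = (PySem.List.enumerate (ps.map (fun p => p.2.2)) c).foldl
        (fun d p => d.modify p.2 [] (fun l => l ++ [p.1])) d := by
  induction ps generalizing d c with
  | nil => simp [PySem.List.enumerate_nil]
  | cons x xs ih =>
    simp only [List.map_cons, PySem.List.enumerate_cons, List.foldl_cons]
    rw [show (if d.contains x.2.2 then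
          (d.modify x.2.2 [] (fun l => l ++ [c]), c + 1)
        else
          (d.insert x.2.2 [c], c + 1))
        = (d.modify x.2.2 [] (fun l => l ++ [c]), c + 1) by
      by_cases h : d.contains x.2.2
      · simp [h]
      · rw [if_neg (by simp [h])]
        have := pv_step_eq d x.2.2 c
        rw [if_neg (by simp [h])] at this
        rw [this]]
    exact ih _ _

-- ===== VERDICT (by name: the statement is the Claim_ definition above) =====
theorem dicionarioDeEntrada_spec : Claim_equal_dicionarioDeEntrada := by
  intro ps _
  show dicionarioDeEntrada ps = dicionarioDeEntrada_alt ps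
  unfold dicionarioDeEntrada dicionarioDeEntrada_alt
  rw [pv_fold_bridge]
  set tempos := ps.map (fun p => p.2.2) with htempos
  set E := PySem.List.enumerate tempos 0 with hE
  -- rewrite the fold keyed by p.2 as the library-shaped fold over swapped pairs
  have hswap :
      (E.foldl (fun d p => d.modify p.2 [] (fun l => l ++ [p.1])) PySem.Dict.empty)
        = ((E.map (fun p => (p.2, p.1))).foldl
            (fun d p => d.modify p.1 [] (fun l => l ++ [p.2])) PySem.Dict.empty) := by
    rw [List.foldl_map]
  rw [hswap]
  set l := E.map (fun p => (p.2, p.1)) with hl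
  set D := l.foldl (fun d p => d.modify p.1 [] (fun l => l ++ [p.2])) PySem.Dict.empty with hD
  have hkeys : D.keys = PySem.List.dedup tempos := by
    rw [hD, PySem.Dict.keys_foldl_modify_key l Prod.fst [] (fun _ p v => v ++ [p.2])]
    have : l.map Prod.fst = tempos := by
      rw [hl, List.map_map]
      exact PySem.List.map_snd_enumerate tempos 0
    rw [this, PySem.Dict.keys_empty, PySem.Set.update_nil_left, PySem.List.dedup_eq_ofList]
  have hnodup : D.keys.Nodup := by
    rw [hkeys]; exact PySem.List.nodup_dedup tempos
  rw [PySem.Dict.items_eq_map_keys D hnodup [], hkeys]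
  apply List.map_congr_left
  intro t _
  have hget := PySem.Dict.getD_foldl_modify_append l PySem.Dict.empty t
  rw [← hD] at hget
  rw [hget]
  simp [hl, List.filter_map, List.map_map, Function.comp_def]
  rfl
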